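-- pv_equiv track=rewrite | github.com/Reset02/Leetcode | 2106-maximum-fruits-harvested-after-at-most-k-steps/2106-maximum-fruits-harvested-after-at-most-k-steps.py | maxTotalFruits
-- ===== SOURCE A (Python) =====
-- from typing import List
--
-- def maxTotalFruits(fruits: List[List[int]], startPos: int, k: int) -> int:
--     # 初始化左右指標、總和、答案
--     left = 0
--     right = 0
--     n = len(fruits)
--     total = 0 # 紀錄目前窗口內的水果總數
--     ans = 0 # 紀錄目前找到的最大水果總數
--
--     # 定義一個函數，用來計算從 startPos 走到 fruits[left][0] ~ fruits[right][0] 所需的最少步數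
--     def step(left: int, right: int) -> int:
--         # 情況一：整個區間都在 startPos 的左邊]
--         if fruits[right][0] <= startPos:
--             return startPos - fruits[left][0]
--         # 情況二：整個區間都在 startPos 的右邊
--         elif fruits[left][0] >= startPos:
--             return fruits[right][0] - startPos
--         # 情況三：跨越 startPos 左右兩邊，需來回走
--         else:
--             return(
--                 min(
--                     abs(startPos - fruits[right][0]), # 先去右邊再往左
--                     abs(startPos - fruits[left][0]) # 或先去左邊再往右
--                 )
--                 + fruits[right][0] - fruits[left][0] # 區間的總距離
--             )
--
--     # 使用 sliding window：每次固定右邊界，逐步調整左邊界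
--     while right < n:
--         # 加入右邊界的水果數量
--         total += fruits[right][1]
--
--         # 如果步數超過限制，就收回左邊界的水果，左邊界右移
--         while left <= right and step(left, right) > k:
--             total -= fruits[left][1]
--             left += 1
--         # 更新最大答案
--         ans = max(ans, total)
--
--         # 右邊界右移
--         right += 1
--
--     return ans
-- ===== SOURCE B (Python) =====
-- from typing import List
--
-- def maxTotalFruits(fruits: List[List[int]], startPos: int, k: int) -> int:
--     # Prefix sums + per-right binary search for the farthest-left reachable fruit,
--     # instead of a stateful two-pointer sliding window.
--     pref = [0]
--     for f in fruits:
--         pref.append(pref[-1] + f[1])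
--
--     def cost(l: int, r: int) -> int:
--         lo_p, hi_p = fruits[l][0], fruits[r][0]
--         if hi_p <= startPos:
--             return startPos - lo_p
--         if lo_p >= startPos:
--             return hi_p - startPos
--         return min(startPos - lo_p, hi_p - startPos) + hi_p - lo_p
--
--     ans = 0
--     for r in range(len(fruits)):
--         # minimal l in [0, r] with cost(l, r) <= k, else r + 1
--         lo, hi = 0, r + 1
--         while lo < hi:
--             mid = (lo + hi) // 2
--             if cost(mid, r) <= k:
--                 hi = mid
--             else:
--                 lo = mid + 1
--         ans = max(ans, pref[r + 1] - pref[lo])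
--     return ans
-- ===== Notes on version B (the rewrite author's own statement) =====
-- stated objective: alternative
-- what changed: Replaced A's stateful two-pointer sliding window (running total, left pointer shrunk inside the scan) by a prefix-sum array plus, for each right end, a binary search for the farthest-left fruit still reachable within k steps.
-- outside the precondition, e.g. on maxTotalFruits([[1, 1], [0, 1]], 3, 2): A returns 2, B returns 1; on maxTotalFruits([[1]], 0, 1): A raises IndexError, B raises IndexError
import Mathlib
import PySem

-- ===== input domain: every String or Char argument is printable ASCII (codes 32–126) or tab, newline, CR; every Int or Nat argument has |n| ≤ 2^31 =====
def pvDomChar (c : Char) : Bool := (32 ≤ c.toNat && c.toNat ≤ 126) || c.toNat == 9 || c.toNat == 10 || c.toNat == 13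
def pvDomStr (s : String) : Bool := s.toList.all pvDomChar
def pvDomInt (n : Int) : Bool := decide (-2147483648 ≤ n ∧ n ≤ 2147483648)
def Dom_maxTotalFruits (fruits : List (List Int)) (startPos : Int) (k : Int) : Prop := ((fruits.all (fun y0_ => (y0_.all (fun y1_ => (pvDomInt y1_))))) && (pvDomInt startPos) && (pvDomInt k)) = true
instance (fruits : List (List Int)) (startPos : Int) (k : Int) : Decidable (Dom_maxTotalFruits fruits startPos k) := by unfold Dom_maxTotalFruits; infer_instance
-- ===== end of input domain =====

-- B replaces A's stateful two-pointer sliding window by a prefix-sum array plus a per-right-end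
-- binary search for the farthest-left reachable fruit (alternative algorithm, not faster).

-- ===== PORT A =====
-- fruits[i] (getD [] never fires inside Pre_: index always in range)
def pvRow (fruits : List (List Int)) (i : Int) : List Int := (PySem.List.pyGet? fruits i).getD []
-- fruits[i][0] / fruits[i][1] (getD 0 never fires inside Pre_: rows have length ≥ 2)
def pvPos (fruits : List (List Int)) (i : Int) : Int := (PySem.List.pyGet? (pvRow fruits i) 0).getD 0
def pvAmt (fruits : List (List Int)) (i : Int) : Int := (PySem.List.pyGet? (pvRow fruits i) 1).getD 0

-- the nested 'step' function of A
def stepA (fruits : List (List Int)) (startPos : Int) (l r : Int) : Int :=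
  if pvPos fruits r ≤ startPos then startPos - pvPos fruits l
  else if pvPos fruits l ≥ startPos then pvPos fruits r - startPos
  else min |startPos - pvPos fruits r| |startPos - pvPos fruits l| + pvPos fruits r - pvPos fruits l

-- A's inner 'while left <= right and step(left, right) > k' loop; state = (left, total);
-- fuel r+1 bounds the number of iterations (left starts ≥ 0 and increases each round)
def shrinkA (fruits : List (List Int)) (startPos k r : Int) : Nat → Int × Int → Int × Int
  | 0, st => st
  | fuel + 1, st =>
    if st.1 ≤ r ∧ k < stepA fruits startPos st.1 r then
      shrinkA fruits startPos k r fuel (st.1 + 1, st.2 - pvAmt fruits st.1)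
    else st

def maxTotalFruits (fruits : List (List Int)) (startPos : Int) (k : Int) : Int :=
  ((List.range fruits.length).foldl
    (fun (st : Int × Int × Int) (r : Nat) =>
      let t0 := st.2.1 + pvAmt fruits (r : Int)
      let st2 := shrinkA fruits startPos k (r : Int) (r + 1) (st.1, t0)
      (st2.1, st2.2, max st.2.2 st2.2))
    (0, 0, 0)).2.2

-- ===== PORT B =====
-- pref: pref[0] = 0, then pref.append(pref[-1] + f[1]) for each row
def buildPref (fruits : List (List Int)) : List Int :=
  fruits.foldl (fun pref f => pref ++ [pref.getLastD 0 + (PySem.List.pyGet? f 1).getD 0]) [0]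

-- B's 'cost' helper
def costB (fruits : List (List Int)) (startPos l r : Int) : Int :=
  let loP := (PySem.List.pyGet? ((PySem.List.pyGet? fruits l).getD []) 0).getD 0
  let hiP := (PySem.List.pyGet? ((PySem.List.pyGet? fruits r).getD []) 0).getD 0
  if hiP ≤ startPos then startPos - loP
  else if loP ≥ startPos then hiP - startPos
  else min (startPos - loP) (hiP - startPos) + hiP - loP

-- B's 'while lo < hi' binary search; fuel r+2 exceeds the interval width r+1
def bsearchB (fruits : List (List Int)) (startPos k r : Int) : Nat → Int → Int → Int
  | 0, lo, _ => lo
  | fuel + 1, lo, hi =>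
    if lo < hi then
      let mid := PySem.Int.floordiv (lo + hi) 2
      if costB fruits startPos mid r ≤ k then bsearchB fruits startPos k r fuel lo mid
      else bsearchB fruits startPos k r fuel (mid + 1) hi
    else lo

def maxTotalFruits_alt (fruits : List (List Int)) (startPos : Int) (k : Int) : Int :=
  let pref := buildPref fruits
  (List.range fruits.length).foldl
    (fun (ans : Int) (r : Nat) =>
      let lo := bsearchB fruits startPos k (r : Int) (r + 2) 0 ((r : Int) + 1)
      max ans ((PySem.List.pyGet? pref ((r : Int) + 1)).getD 0 - (PySem.List.pyGet? pref lo).getD 0))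
    0

-- ===== PRECONDITION & SPEC =====
-- Pre_ excludes (a) rows of length < 2, on which the Python A raises IndexError, and
-- (b) fruit lists whose positions are not nondecreasing — outside the problem's stated contract
-- ("fruits is sorted by positions"), where the sliding window's value is an accident of the scan
-- order — except for the two degenerate shapes where order cannot matter and A = B still holds:
-- every window costs ≤ k (everything reachable) or every window costs > k (nothing reachable).
def Pre_maxTotalFruits (fruits : List (List Int)) (startPos : Int) (k : Int) : Prop :=
  (∀ row ∈ fruits, 2 ≤ row.length) ∧
  (List.Pairwise (fun a b : List Int =>
      (PySem.List.pyGet? a 0).getD 0 ≤ (PySem.List.pyGet? b 0).getD 0) fruits ∨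
   (∀ r < fruits.length, ∀ l ≤ r, stepA fruits startPos (l : Int) (r : Int) ≤ k) ∨
   (∀ r < fruits.length, ∀ l ≤ r, k < stepA fruits startPos (l : Int) (r : Int)))
instance (fruits : List (List Int)) (startPos : Int) (k : Int) : Decidable (Pre_maxTotalFruits fruits startPos k) := by unfold Pre_maxTotalFruits; infer_instance

def pvWitness_maxTotalFruits : List (List Int) × Int × Int := ([[1, 2], [3, 4], [6, 1]], 2, 4)

def Spec_maxTotalFruits (fruits : List (List Int)) (startPos : Int) (k : Int) (out : Int) : Prop := out = maxTotalFruits_alt fruits startPos k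
instance (fruits : List (List Int)) (startPos : Int) (k : Int) (out : Int) : Decidable (Spec_maxTotalFruits fruits startPos k out) := by unfold Spec_maxTotalFruits; infer_instance

-- ===== CLAIM (what is proved, stated in full; the proofs are below) =====
def Claim_equal_maxTotalFruits : Prop := ∀ (fruits : List (List Int)) (startPos : Int) (k : Int), Dom_maxTotalFruits fruits startPos k → Pre_maxTotalFruits fruits startPos k → Spec_maxTotalFruits fruits startPos k (maxTotalFruits fruits startPos k)

-- ===== LEMMAS AND PROOFS =====

-- positions are nondecreasing (consequence of Pre_, in index form)
def pvSorted (fruits : List (List Int)) : Prop :=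
  ∀ i j : Nat, i ≤ j → j < fruits.length → pvPos fruits (i : Int) ≤ pvPos fruits (j : Int)

theorem pvPos_eq_getElem (fruits : List (List Int)) (i : Nat) (hi : i < fruits.length) :
    pvPos fruits (i : Int) = (PySem.List.pyGet? fruits[i] 0).getD 0 := by
  simp [pvPos, pvRow, List.getElem?_eq_getElem hi]

theorem sorted_of_pairwise (fruits : List (List Int))
    (h : List.Pairwise (fun a b : List Int =>
      (PySem.List.pyGet? a 0).getD 0 ≤ (PySem.List.pyGet? b 0).getD 0) fruits) :
    pvSorted fruits := by
  intro i j hij hj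
  rcases eq_or_lt_of_le hij with rfl | hlt
  · exact le_rfl
  · rw [pvPos_eq_getElem fruits i (lt_of_le_of_lt hij hj), pvPos_eq_getElem fruits j hj]
    exact (List.pairwise_iff_getElem.mp h) i j (lt_of_le_of_lt hij hj) hj hlt

-- closed form for A's step cost, valid when positions are in order
theorem stepA_closed (fruits : List (List Int)) (s l r : Int) (hlr : pvPos fruits l ≤ pvPos fruits r) :
    stepA fruits s l r =
      min (pvPos fruits r - pvPos fruits l + |s - pvPos fruits l|)
          (pvPos fruits r - pvPos fruits l + |s - pvPos fruits r|) := by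
  unfold stepA
  rcases abs_cases (s - pvPos fruits l) with ⟨hl1, hl2⟩ | ⟨hl1, hl2⟩ <;>
    rcases abs_cases (s - pvPos fruits r) with ⟨hr1, hr2⟩ | ⟨hr1, hr2⟩ <;>
      split_ifs <;> omega

-- B's cost equals A's step on every input
theorem costB_eq_stepA (fruits : List (List Int)) (s l r : Int) :
    costB fruits s l r = stepA fruits s l r := by
  simp only [costB, stepA, pvPos, pvRow]
  rcases abs_cases (s - (PySem.List.pyGet? ((PySem.List.pyGet? fruits l).getD []) 0).getD 0) with ⟨hl1, hl2⟩ | ⟨hl1, hl2⟩ <;>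
    rcases abs_cases (s - (PySem.List.pyGet? ((PySem.List.pyGet? fruits r).getD []) 0).getD 0) with ⟨hr1, hr2⟩ | ⟨hr1, hr2⟩ <;>
      split_ifs <;> omega

-- step is antitone in the left index
theorem stepA_anti (fruits : List (List Int)) (s k : Int) (hs : pvSorted fruits)
    (l l' r : Nat) (h1 : l ≤ l') (h2 : l' ≤ r) (h3 : r < fruits.length) :
    stepA fruits s (l' : Int) (r : Int) ≤ stepA fruits s (l : Int) (r : Int) := by
  have a1 := hs l l' (by omega) (by omega)
  have a2 := hs l' r h2 h3
  have a3 := hs l r (by omega) h3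
  rw [stepA_closed fruits s l r a3, stepA_closed fruits s l' r a2]
  rcases abs_cases (s - pvPos fruits (l : Int)) with ⟨hl1, hl2⟩ | ⟨hl1, hl2⟩ <;>
    rcases abs_cases (s - pvPos fruits (l' : Int)) with ⟨hm1, hm2⟩ | ⟨hm1, hm2⟩ <;> omega

-- step is monotone in the right index
theorem stepA_mono (fruits : List (List Int)) (s k : Int) (hs : pvSorted fruits)
    (l r r' : Nat) (h1 : l ≤ r) (h2 : r ≤ r') (h3 : r' < fruits.length) :
    stepA fruits s (l : Int) (r : Int) ≤ stepA fruits s (l : Int) (r' : Int) := by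
  have a1 := hs r r' h2 h3
  have a2 := hs l r h1 (by omega)
  have a3 := hs l r' (by omega) h3
  rw [stepA_closed fruits s l r a2, stepA_closed fruits s l r' a3]
  rcases abs_cases (s - pvPos fruits (r : Int)) with ⟨hl1, hl2⟩ | ⟨hl1, hl2⟩ <;>
    rcases abs_cases (s - pvPos fruits (r' : Int)) with ⟨hm1, hm2⟩ | ⟨hm1, hm2⟩ <;> omega

-- the leftmost index l ≤ r whose window [l, r] is reachable within k steps (r+1 if none)
def lstar (fruits : List (List Int)) (s k : Int) (r : Nat) : Nat :=
  Nat.find (p := fun l => r + 1 ≤ l ∨ stepA fruits s (l : Int) (r : Int) ≤ k) ⟨r + 1, Or.inl le_rfl⟩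

theorem lstar_le (fruits : List (List Int)) (s k : Int) (r : Nat) : lstar fruits s k r ≤ r + 1 :=
  Nat.find_le (Or.inl le_rfl)

theorem lstar_min (fruits : List (List Int)) (s k : Int) (r : Nat) {m : Nat}
    (h : m < lstar fruits s k r) : m ≤ r ∧ k < stepA fruits s (m : Int) (r : Int) := by
  have := Nat.find_min (p := fun l => r + 1 ≤ l ∨ stepA fruits s (l : Int) (r : Int) ≤ k)
    ⟨r + 1, Or.inl le_rfl⟩ h
  push_neg at this
  exact ⟨by omega, this.2⟩

theorem lstar_feas (fruits : List (List Int)) (s k : Int) (r : Nat)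
    (h : lstar fruits s k r ≤ r) :
    stepA fruits s (lstar fruits s k r : Int) (r : Int) ≤ k := by
  unfold lstar at h ⊢
  have := Nat.find_spec (p := fun l => r + 1 ≤ l ∨ stepA fruits s (l : Int) (r : Int) ≤ k)
    ⟨r + 1, Or.inl le_rfl⟩
  rcases this with h' | h'
  · omega
  · exact h'

theorem lstar_mono (fruits : List (List Int)) (s k : Int) (hs : pvSorted fruits)
    (r r' : Nat) (h : r ≤ r') (h' : r' < fruits.length) :
    lstar fruits s k r ≤ lstar fruits s k r' := by
  unfold lstar
  rw [Nat.le_find_iff]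
  intro m hm
  have ⟨hm1, hm2⟩ := lstar_min fruits s k r hm
  push_neg
  refine ⟨by omega, ?_⟩
  have := stepA_mono fruits s k hs m r r' hm1 h h'
  omega

-- sum of the amounts over index range [a, b)
def sAmt (fruits : List (List Int)) (a b : Nat) : Int :=
  ∑ i ∈ Finset.Ico a b, pvAmt fruits (i : Int)

theorem sAmt_bot (fruits : List (List Int)) (a b : Nat) (h : a < b) :
    sAmt fruits a b = pvAmt fruits (a : Int) + sAmt fruits (a + 1) b := by
  rw [sAmt, sAmt, Finset.sum_eq_sum_Ico_succ_bot h]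

theorem sAmt_top (fruits : List (List Int)) (a b : Nat) (h : a ≤ b) :
    sAmt fruits a (b + 1) = sAmt fruits a b + pvAmt fruits (b : Int) := by
  rw [sAmt, sAmt, Finset.sum_Ico_succ_top h]

theorem sAmt_trans (fruits : List (List Int)) (a b c : Nat) (h1 : a ≤ b) (h2 : b ≤ c) :
    sAmt fruits a b + sAmt fruits b c = sAmt fruits a c :=
  Finset.sum_Ico_consecutive _ h1 h2

-- A's inner loop lands exactly on lstar and subtracts the skipped amounts
theorem shrink_spec (fruits : List (List Int)) (s k : Int) (r : Nat) :
    ∀ (fuel : Nat) (L0 : Nat) (t0 : Int), L0 ≤ lstar fruits s k r →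
      lstar fruits s k r - L0 ≤ fuel →
      shrinkA fruits s k (r : Int) fuel ((L0 : Int), t0) =
        ((lstar fruits s k r : Int), t0 - sAmt fruits L0 (lstar fruits s k r)) := by
  intro fuel
  induction fuel with
  | zero =>
    intro L0 t0 h1 h2
    have e : lstar fruits s k r = L0 := by omega
    simp [shrinkA, e, sAmt]
  | succ fuel ih =>
    intro L0 t0 h1 h2
    by_cases hc : L0 < lstar fruits s k r
    · have hm := lstar_min fruits s k r hc
      rw [shrinkA, if_pos ⟨by change (L0 : Int) ≤ (r : Int); exact_mod_cast hm.1, hm.2⟩]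
      rw [show ((L0 : Int) + 1, t0 - pvAmt fruits (L0 : Int)) =
            (((L0 + 1 : Nat) : Int), t0 - pvAmt fruits (L0 : Int)) by push_cast; ring_nf]
      rw [ih (L0 + 1) (t0 - pvAmt fruits (L0 : Int)) (by omega) (by omega)]
      rw [sAmt_bot fruits L0 (lstar fruits s k r) hc]
      refine Prod.ext rfl ?_
      simp only
      ring
    · have e : lstar fruits s k r = L0 := by omega
      have hfalse : ¬(((L0 : Int) ≤ (r : Int)) ∧ k < stepA fruits s (L0 : Int) (r : Int)) := by
        by_cases hr : L0 ≤ r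
        · have hf := lstar_feas fruits s k r (by omega)
          rw [e] at hf
          rintro ⟨_, h⟩
          omega
        · rintro ⟨h, _⟩
          have : L0 ≤ r := by exact_mod_cast h
          omega
      rw [shrinkA, if_neg hfalse, e]
      simp [sAmt]

-- the value A's outer loop has accumulated after the first m rounds
def ansSeq (fruits : List (List Int)) (s k : Int) : Nat → Int
  | 0 => 0
  | r + 1 => max (ansSeq fruits s k r) (sAmt fruits (lstar fruits s k r) (r + 1))

def lprev (fruits : List (List Int)) (s k : Int) : Nat → Nat
  | 0 => 0
  | r + 1 => lstar fruits s k r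

theorem a_fold (fruits : List (List Int)) (s k : Int)
    (hmono : ∀ r r' : Nat, r ≤ r' → r' < fruits.length →
      lstar fruits s k r ≤ lstar fruits s k r') :
    ∀ m, m ≤ fruits.length →
      (List.range m).foldl
        (fun (st : Int × Int × Int) (r : Nat) =>
          let t0 := st.2.1 + pvAmt fruits (r : Int)
          let st2 := shrinkA fruits s k (r : Int) (r + 1) (st.1, t0)
          (st2.1, st2.2, max st.2.2 st2.2))
        (0, 0, 0) =
      ((lprev fruits s k m : Int),
        sAmt fruits (lprev fruits s k m) m, ansSeq fruits s k m) := by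
  intro m
  induction m with
  | zero => intro _; simp [lprev, ansSeq, sAmt]
  | succ m ih =>
    intro hm
    rw [List.range_succ, List.foldl_append, ih (by omega)]
    simp only [List.foldl_cons, List.foldl_nil]
    have hl1 : lprev fruits s k m ≤ lstar fruits s k m := by
      cases m with
      | zero => exact Nat.zero_le _
      | succ r => exact hmono r (r + 1) (by omega) (by omega)
    have hl2 : lprev fruits s k m ≤ m := by
      cases m with
      | zero => exact le_rfl
      | succ r => exact lstar_le fruits s k r
    rw [shrink_spec fruits s k m (m + 1) (lprev fruits s k m)
      (sAmt fruits (lprev fruits s k m) m + pvAmt fruits (m : Int)) hl1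
      (by have := lstar_le fruits s k m; omega)]
    have htot : sAmt fruits (lprev fruits s k m) m + pvAmt fruits (m : Int) -
        sAmt fruits (lprev fruits s k m) (lstar fruits s k m) =
        sAmt fruits (lstar fruits s k m) (m + 1) := by
      rw [← sAmt_top fruits (lprev fruits s k m) m hl2,
        ← sAmt_trans fruits (lprev fruits s k m) (lstar fruits s k m) (m + 1) hl1
          (lstar_le fruits s k m)]
      ring
    refine Prod.ext rfl (Prod.ext ?_ ?_) <;> simp only
    · rw [htot]; rfl
    · rw [htot]; rfl

-- B's binary search lands exactly on lstar
theorem bsearch_spec (fruits : List (List Int)) (s k : Int) (r : Nat)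
    (hup : ∀ m : Nat, m ≤ r → lstar fruits s k r ≤ m →
      stepA fruits s (m : Int) (r : Int) ≤ k) :
    ∀ (fuel : Nat) (lo hi : Nat), lo ≤ lstar fruits s k r → lstar fruits s k r ≤ hi →
      hi ≤ r + 1 → hi - lo ≤ fuel →
      bsearchB fruits s k (r : Int) fuel (lo : Int) (hi : Int) = (lstar fruits s k r : Int) := by
  intro fuel
  induction fuel with
  | zero =>
    intro lo hi h1 h2 h3 h4
    have e : lo = lstar fruits s k r := by omega
    simp [bsearchB, e]
  | succ fuel ih =>
    intro lo hi h1 h2 h3 h4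
    simp only [bsearchB]
    by_cases hlh : lo < hi
    · rw [if_pos (by exact_mod_cast hlh)]
      have hmid : PySem.Int.floordiv ((lo : Int) + (hi : Int)) 2 = (((lo + hi) / 2 : Nat) : Int) := by
        rw [show ((lo : Int) + (hi : Int)) = (((lo + hi : Nat)) : Int) by push_cast; ring]
        exact_mod_cast PySem.Int.floordiv_natCast (lo + hi) 2
      have hM1 : lo ≤ (lo + hi) / 2 := by omega
      have hM2 : (lo + hi) / 2 < hi := by omega
      rw [hmid, costB_eq_stepA]
      by_cases hf : stepA fruits s (((lo + hi) / 2 : Nat) : Int) (r : Int) ≤ k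
      · rw [if_pos hf]
        have hls : lstar fruits s k r ≤ (lo + hi) / 2 := by
          unfold lstar; exact Nat.find_le (Or.inr hf)
        exact ih lo ((lo + hi) / 2) h1 hls (by omega) (by omega)
      · rw [if_neg hf]
        have hlt : (lo + hi) / 2 < lstar fruits s k r := by
          by_contra hcon
          push_neg at hcon
          exact hf (hup ((lo + hi) / 2) (by omega) hcon)
        rw [show ((((lo + hi) / 2 : Nat) : Int) + 1) = (((lo + hi) / 2 + 1 : Nat) : Int) by
          push_cast; ring]
        exact ih ((lo + hi) / 2 + 1) hi (by omega) h2 h3 (by omega)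
    · rw [if_neg (by exact_mod_cast hlh)]
      have e : lo = lstar fruits s k r := by omega
      rw [e]

-- the prefix list built by B evaluates to sAmt
theorem pref_eval (fruits : List (List Int)) :
    ∀ i : Nat, i ≤ fruits.length →
      (PySem.List.pyGet? (buildPref fruits) (i : Int)).getD 0 = sAmt fruits 0 i := by
  have key : buildPref fruits = (List.range (fruits.length + 1)).map (fun i => sAmt fruits 0 i) := by
    induction fruits using List.reverseRecOn with
    | nil => simp [buildPref, sAmt]
    | append_singleton fs g ih =>
      show (fs ++ [g]).foldl _ [0] = _
      rw [List.foldl_append]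
      simp only [List.foldl_cons, List.foldl_nil]
      rw [show fs.foldl (fun pref f =>
            pref ++ [pref.getLastD 0 + (PySem.List.pyGet? f 1).getD 0]) [0] = buildPref fs from rfl,
        ih]
      have hamt : ∀ j : Nat, j < fs.length → pvAmt (fs ++ [g]) (j : Int) = pvAmt fs (j : Int) := by
        intro j hj
        simp [pvAmt, pvRow, List.getElem?_append_left hj]
      have hsame : ∀ i : Nat, i ≤ fs.length → sAmt (fs ++ [g]) 0 i = sAmt fs 0 i := by
        intro i hi
        refine Finset.sum_congr rfl ?_
        intro j hj
        rw [Finset.mem_Ico] at hj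
        exact hamt j (by omega)
      have hlast : (List.map (fun i => sAmt fs 0 i) (List.range (fs.length + 1))).getLastD 0 =
          sAmt fs 0 fs.length := by
        rw [List.range_succ, List.map_append]
        simp
      rw [show (fs ++ [g]).length + 1 = (fs.length + 1) + 1 by simp]
      rw [List.range_succ (n := fs.length + 1), List.map_append]
      congr 1
      · rw [List.map_congr_left]
        intro a ha
        rw [List.mem_range] at ha
        exact (hsame a (by omega)).symm
      · simp only [List.map_cons, List.map_nil]
        congr 1
        rw [hlast, sAmt_top (fs ++ [g]) 0 fs.length (Nat.zero_le _),
          hsame fs.length le_rfl]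
        congr 1
        simp [pvAmt, pvRow]
  intro i hi
  rw [key]
  rw [PySem.List.pyGet?_natCast]
  rw [List.getElem?_map]
  rw [List.getElem?_range (by omega)]
  rfl

theorem b_fold (fruits : List (List Int)) (s k : Int)
    (hup : ∀ r : Nat, r < fruits.length → ∀ m : Nat, m ≤ r → lstar fruits s k r ≤ m →
      stepA fruits s (m : Int) (r : Int) ≤ k) :
    ∀ m, m ≤ fruits.length →
      (List.range m).foldl
        (fun (ans : Int) (r : Nat) =>
          let lo := bsearchB fruits s k (r : Int) (r + 2) 0 ((r : Int) + 1)
          max ans ((PySem.List.pyGet? (buildPref fruits) ((r : Int) + 1)).getD 0 -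
            (PySem.List.pyGet? (buildPref fruits) lo).getD 0))
        0 = ansSeq fruits s k m := by
  intro m
  induction m with
  | zero => intro _; simp [ansSeq]
  | succ m ih =>
    intro hm
    rw [List.range_succ, List.foldl_append, ih (by omega)]
    simp only [List.foldl_cons, List.foldl_nil]
    have hb : bsearchB fruits s k (m : Int) (m + 2) 0 ((m : Int) + 1) = (lstar fruits s k m : Int) := by
      have := bsearch_spec fruits s k m (hup m (by omega)) (m + 2) 0 (m + 1) (Nat.zero_le _)
        (lstar_le fruits s k m) le_rfl (by omega)
      push_cast at this
      exact this
    rw [hb]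
    have e1 : (PySem.List.pyGet? (buildPref fruits) ((m : Int) + 1)).getD 0 =
        sAmt fruits 0 (m + 1) := by
      have := pref_eval fruits (m + 1) (by omega)
      push_cast at this
      exact this
    have e2 : (PySem.List.pyGet? (buildPref fruits) ((lstar fruits s k m : Nat) : Int)).getD 0 =
        sAmt fruits 0 (lstar fruits s k m) :=
      pref_eval fruits (lstar fruits s k m) (by have := lstar_le fruits s k m; omega)
    rw [e1, e2]
    have hdiff : sAmt fruits 0 (m + 1) - sAmt fruits 0 (lstar fruits s k m) =
        sAmt fruits (lstar fruits s k m) (m + 1) := by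
      rw [← sAmt_trans fruits 0 (lstar fruits s k m) (m + 1) (Nat.zero_le _)
        (lstar_le fruits s k m)]
      ring
    rw [hdiff]
    rfl

-- sorted positions give both required facts about lstar
theorem sorted_mono (fruits : List (List Int)) (s k : Int) (hs : pvSorted fruits) :
    ∀ r r' : Nat, r ≤ r' → r' < fruits.length → lstar fruits s k r ≤ lstar fruits s k r' :=
  fun r r' h h' => lstar_mono fruits s k hs r r' h h'

theorem sorted_up (fruits : List (List Int)) (s k : Int) (hs : pvSorted fruits) :
    ∀ r : Nat, r < fruits.length → ∀ m : Nat, m ≤ r → lstar fruits s k r ≤ m →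
      stepA fruits s (m : Int) (r : Int) ≤ k := by
  intro r hr m hmr hlm
  have hlr : lstar fruits s k r ≤ r := le_trans hlm hmr
  have h1 := lstar_feas fruits s k r hlr
  have h2 := stepA_anti fruits s k hs (lstar fruits s k r) m r hlm hmr hr
  omega

-- every window reachable: lstar is constantly 0
theorem all_lstar (fruits : List (List Int)) (s k : Int)
    (hAll : ∀ r < fruits.length, ∀ l ≤ r, stepA fruits s (l : Int) (r : Int) ≤ k) :
    ∀ r : Nat, r < fruits.length → lstar fruits s k r = 0 := by
  intro r hr
  unfold lstar
  rw [Nat.find_eq_zero]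
  exact Or.inr (hAll r hr 0 (Nat.zero_le _))

-- no window reachable: lstar is constantly r+1
theorem none_lstar (fruits : List (List Int)) (s k : Int)
    (hNone : ∀ r < fruits.length, ∀ l ≤ r, k < stepA fruits s (l : Int) (r : Int)) :
    ∀ r : Nat, r < fruits.length → lstar fruits s k r = r + 1 := by
  intro r hr
  refine le_antisymm (lstar_le fruits s k r) ?_
  unfold lstar
  rw [Nat.le_find_iff]
  intro m hm
  push_neg
  exact ⟨by omega, by have := hNone r hr m (by omega); omega⟩

-- ===== VERDICT (by name: the statement is the Claim_ definition above) =====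
theorem maxTotalFruits_spec : Claim_equal_maxTotalFruits := by
  intro fruits s k _hdom hpre
  unfold Spec_maxTotalFruits maxTotalFruits maxTotalFruits_alt
  rcases hpre.2 with hsorted | hall | hnone
  · have hs := sorted_of_pairwise fruits hsorted
    rw [a_fold fruits s k (sorted_mono fruits s k hs) fruits.length le_rfl,
      b_fold fruits s k (sorted_up fruits s k hs) fruits.length le_rfl]
  · have hmono : ∀ r r' : Nat, r ≤ r' → r' < fruits.length →
        lstar fruits s k r ≤ lstar fruits s k r' := by
      intro r r' h h'
      rw [all_lstar fruits s k hall r (by omega), all_lstar fruits s k hall r' h']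
    have hup : ∀ r : Nat, r < fruits.length → ∀ m : Nat, m ≤ r → lstar fruits s k r ≤ m →
        stepA fruits s (m : Int) (r : Int) ≤ k := fun r hr m hmr _ => hall r hr m hmr
    rw [a_fold fruits s k hmono fruits.length le_rfl, b_fold fruits s k hup fruits.length le_rfl]
  · have hmono : ∀ r r' : Nat, r ≤ r' → r' < fruits.length →
        lstar fruits s k r ≤ lstar fruits s k r' := by
      intro r r' h h'
      rw [none_lstar fruits s k hnone r (by omega), none_lstar fruits s k hnone r' h']
      omega
    have hup : ∀ r : Nat, r < fruits.length → ∀ m : Nat, m ≤ r → lstar fruits s k r ≤ m →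
        stepA fruits s (m : Int) (r : Int) ≤ k := by
      intro r hr m hmr hlm
      rw [none_lstar fruits s k hnone r hr] at hlm
      omega
    rw [a_fold fruits s k hmono fruits.length le_rfl, b_fold fruits s k hup fruits.length le_rfl]
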